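-- pv_equiv track=rewrite | github.com/intellistream/SAGE | packages/sage-benchmark/src/sage/benchmark/benchmark_agent/scripts/run_acebench_comparison.py | _simple_keyword_match
-- ===== SOURCE A (Python) =====
-- def _simple_keyword_match(
--     query: str, candidate_tools: list[str], top_k: int
-- ) -> list[str]:
--     """Simple keyword matching fallback."""
--     query_words = set(query.lower().split())
--     scores = []
--     for tool in candidate_tools:
--         tool_words = set(tool.lower().replace("_", " ").split())
--         score = len(query_words & tool_words)
--         scores.append((tool, score))
--     scores.sort(key=lambda x: x[1], reverse=True)
--     return [tool for tool, _ in scores[:top_k]]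
-- ===== SOURCE B (Python) =====
-- def _simple_keyword_match(
--     query: str, candidate_tools: list[str], top_k: int
-- ) -> list[str]:
--     """Keyword matching via score buckets (counting sort) instead of a comparison sort."""
--     query_words = set(query.lower().split())
--     buckets = {}
--     for tool in candidate_tools:
--         tool_words = set(tool.lower().replace("_", " ").split())
--         score = len(query_words & tool_words)
--         buckets.setdefault(score, []).append(tool)
--     ordered = []
--     for s in range(len(query_words), -1, -1):
--         ordered.extend(buckets.get(s, []))
--     return ordered[:top_k]
-- ===== Notes on version B (the rewrite author's own statement) =====
-- stated objective: alternative
-- what changed: Replaces the comparison sort of (tool, score) pairs by a counting/bucket sort: tools are appended to a score-keyed bucket dict in input order and buckets are emitted from the maximal possible score down to 0, which preserves the stable tie order.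
import Mathlib
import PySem

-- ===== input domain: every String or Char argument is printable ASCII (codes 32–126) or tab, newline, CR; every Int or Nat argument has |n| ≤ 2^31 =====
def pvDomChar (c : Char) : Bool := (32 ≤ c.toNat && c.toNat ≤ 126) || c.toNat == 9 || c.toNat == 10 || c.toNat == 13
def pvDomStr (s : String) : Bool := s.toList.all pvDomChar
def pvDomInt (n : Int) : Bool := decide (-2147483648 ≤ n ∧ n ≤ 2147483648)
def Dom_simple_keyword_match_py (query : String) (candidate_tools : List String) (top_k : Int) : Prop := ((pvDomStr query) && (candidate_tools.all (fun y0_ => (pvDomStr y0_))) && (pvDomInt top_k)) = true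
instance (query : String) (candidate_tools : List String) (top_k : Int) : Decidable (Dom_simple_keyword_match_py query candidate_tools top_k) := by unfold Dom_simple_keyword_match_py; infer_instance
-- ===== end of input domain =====

-- B replaces A's comparison sort of (tool, score) pairs by a score-keyed bucket dict emitted
-- from the maximal possible score down to 0 (a counting sort); same stable tie order.

-- ===== PORT A =====
def simple_keyword_match_py (query : String) (candidate_tools : List String) (top_k : Int) : List String :=
  let query_words := PySem.Set.ofList (PySem.Str.split₀ (PySem.Str.lower query))
  let scores := candidate_tools.foldl (fun acc tool =>
    let tool_words := PySem.Set.ofList (PySem.Str.split₀ (PySem.Str.replace (PySem.Str.lower tool) "_" " "))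
    acc ++ [(tool, PySem.Set.len (PySem.Set.inter query_words tool_words))]) []
  let sortedScores := PySem.List.sorted scores (fun x => x.2) true
  (PySem.List.slice sortedScores none (some top_k)).map (fun x => x.1)

-- ===== PORT B =====
-- buckets.setdefault(score, []).append(tool) is ported as Dict.modify score [] (· ++ [tool]):
-- both set d[score] to d.get(score, []) + [tool], keeping the key's insertion position.
def simple_keyword_match_py_alt (query : String) (candidate_tools : List String) (top_k : Int) : List String :=
  let query_words := PySem.Set.ofList (PySem.Str.split₀ (PySem.Str.lower query))
  let buckets := candidate_tools.foldl (fun (d : PySem.Dict Int (List String)) tool =>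
    let tool_words := PySem.Set.ofList (PySem.Str.split₀ (PySem.Str.replace (PySem.Str.lower tool) "_" " "))
    let score := PySem.Set.len (PySem.Set.inter query_words tool_words)
    d.modify score [] (· ++ [tool])) PySem.Dict.empty
  let ordered := (PySem.List.pyRange (PySem.Set.len query_words) (-1) (-1)).foldl
    (fun acc s => acc ++ buckets.getD s []) []
  PySem.List.slice ordered none (some top_k)

-- ===== PRECONDITION & SPEC =====
def Spec_simple_keyword_match_py (query : String) (candidate_tools : List String) (top_k : Int) (out : List String) : Prop := out = simple_keyword_match_py_alt query candidate_tools top_k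
instance (query : String) (candidate_tools : List String) (top_k : Int) (out : List String) : Decidable (Spec_simple_keyword_match_py query candidate_tools top_k out) := by unfold Spec_simple_keyword_match_py; infer_instance

-- ===== CLAIM (what is proved, stated in full; the proofs are below) =====
def Claim_equal_simple_keyword_match_py : Prop := ∀ (query : String) (candidate_tools : List String) (top_k : Int), Dom_simple_keyword_match_py query candidate_tools top_k → Spec_simple_keyword_match_py query candidate_tools top_k (simple_keyword_match_py query candidate_tools top_k)

-- ===== LEMMAS AND PROOFS =====

-- G ss xs: the buckets of xs (pairs, keyed by .2) listed along the score list ss.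
def pvG (ss : List Int) (xs : List (String × Int)) : List (String × Int) :=
  ss.flatMap (fun s => xs.filter (fun p => p.2 == s))

theorem pvG_snd_mem {ss : List Int} {xs : List (String × Int)} {y : String × Int}
    (h : y ∈ pvG ss xs) : y.2 ∈ ss := by
  simp only [pvG, List.mem_flatMap, List.mem_filter] at h
  obtain ⟨s, hs, _, he⟩ := h
  rw [beq_iff_eq] at he
  rw [he]; exact hs

theorem pvG_cons (s : Int) (ss : List Int) (xs : List (String × Int)) :
    pvG (s :: ss) xs = xs.filter (fun p => p.2 == s) ++ pvG ss xs := by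
  simp [pvG]

theorem pvG_snoc_not_mem {ss : List Int} {x : String × Int} (h : x.2 ∉ ss)
    (xs : List (String × Int)) : pvG ss (xs ++ [x]) = pvG ss xs := by
  induction ss with
  | nil => simp [pvG]
  | cons s ss ih =>
    have hxs : (x.2 == s) = false := by
      simp only [beq_eq_false_iff_ne, ne_eq]
      intro he; exact h (by simp [he])
    rw [pvG_cons, pvG_cons, List.filter_append,
      ih (fun hm => h (List.mem_cons_of_mem _ hm))]
    simp [hxs]

theorem pv_insertBy_append {α : Type} (bf : α → α → Bool) (x : α) (A B : List α)
    (h : ∀ y ∈ A, bf x y = false) :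
    PySem.List.insertBy bf x (A ++ B) = A ++ PySem.List.insertBy bf x B := by
  induction A with
  | nil => simp
  | cons a A ih =>
    have ha := h a (by simp)
    simp [PySem.List.insertBy, ha, ih (fun y hy => h y (by simp [hy]))]

theorem pv_insert_into_pvG (ss : List Int) (hss : ss.Pairwise (· > ·))
    (x : String × Int) (hx : x.2 ∈ ss) (xs : List (String × Int)) :
    PySem.List.insertBy (fun a b => decide (b.2 < a.2)) x (pvG ss xs) = pvG ss (xs ++ [x]) := by
  induction ss with
  | nil => exact absurd hx (List.not_mem_nil)
  | cons s ss ih =>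
    rcases List.pairwise_cons.mp hss with ⟨hgt, hss'⟩
    rw [pvG_cons, pvG_cons, List.filter_append]
    by_cases hx2 : x.2 = s
    · have hA : ∀ y ∈ xs.filter (fun p => p.2 == s), (decide (y.2 < x.2)) = false := by
        intro y hy
        have : y.2 = s := by simpa using (List.mem_filter.mp hy).2
        simp [this, hx2]
      rw [pv_insertBy_append _ _ _ _ hA]
      have hnot : x.2 ∉ ss := by
        intro hm; exact absurd (hgt _ hm) (by simp [hx2])
      have htail : PySem.List.insertBy (fun a b => decide (b.2 < a.2)) x (pvG ss xs)
          = x :: pvG ss xs := by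
        cases hG : pvG ss xs with
        | nil => simp [PySem.List.insertBy]
        | cons y ys =>
          have hy2 : y.2 ∈ ss := pvG_snd_mem (by rw [hG]; exact List.mem_cons_self)
          have : y.2 < x.2 := by rw [hx2]; exact hgt _ hy2
          simp [PySem.List.insertBy, this]
      rw [htail, pvG_snoc_not_mem hnot]
      simp [hx2]
    · have hxss : x.2 ∈ ss := by
        rcases List.mem_cons.mp hx with h | h
        · exact absurd h hx2
        · exact h
      have hA : ∀ y ∈ xs.filter (fun p => p.2 == s), (decide (y.2 < x.2)) = false := by
        intro y hy
        have hy2 : y.2 = s := by simpa using (List.mem_filter.mp hy).2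
        have : x.2 < s := hgt _ hxss
        simp [hy2]; omega
      rw [pv_insertBy_append _ _ _ _ hA, ih hss' hxss]
      have : (x.2 == s) = false := by simp [hx2]
      simp [this]

theorem pv_sorted_eq_pvG (ss : List Int) (hss : ss.Pairwise (· > ·))
    (xs : List (String × Int)) (hmem : ∀ p ∈ xs, p.2 ∈ ss) :
    PySem.List.sorted xs (fun p => p.2) true = pvG ss xs := by
  induction xs using List.reverseRecOn with
  | nil => simp [PySem.List.sorted, pvG]
  | append_singleton xs x ih =>
    have hstep : PySem.List.sorted (xs ++ [x]) (fun p => p.2) true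
        = PySem.List.insertBy (fun a b => decide (b.2 < a.2)) x
            (PySem.List.sorted xs (fun p => p.2) true) := by
      rw [PySem.List.sorted_rev_eq_foldl_insertBy, PySem.List.sorted_rev_eq_foldl_insertBy,
        List.foldl_append]
      rfl
    rw [hstep, ih (fun p hp => hmem p (by simp [hp])),
      pv_insert_into_pvG ss hss x (hmem x (by simp)) xs]

theorem pv_buckets_getD (W : List String) (l : List String) (d : PySem.Dict Int (List String)) (s : Int) :
    (l.foldl (fun d tool =>
      d.modify (PySem.Set.len (PySem.Set.inter W (PySem.Set.ofList (PySem.Str.split₀ (PySem.Str.replace (PySem.Str.lower tool) "_" " "))))) [] (· ++ [tool])) d).getD s []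
    = d.getD s [] ++ l.filter (fun tool => PySem.Set.len (PySem.Set.inter W (PySem.Set.ofList (PySem.Str.split₀ (PySem.Str.replace (PySem.Str.lower tool) "_" " ")))) == s) := by
  induction l using List.reverseRecOn generalizing d with
  | nil => simp
  | append_singleton l x ih =>
    rw [List.foldl_append]
    simp only [List.foldl_cons, List.foldl_nil]
    rw [PySem.Dict.getD_modify, List.filter_append]
    by_cases hs : s = PySem.Set.len (PySem.Set.inter W (PySem.Set.ofList (PySem.Str.split₀ (PySem.Str.replace (PySem.Str.lower x) "_" " "))))
    · rw [if_pos hs]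
      subst hs
      rw [ih]
      simp [List.append_assoc]
    · rw [if_neg hs, ih]
      have hb : (PySem.Set.len (PySem.Set.inter W (PySem.Set.ofList (PySem.Str.split₀ (PySem.Str.replace (PySem.Str.lower x) "_" " ")))) == s) = false := by
        simp only [beq_eq_false_iff_ne, ne_eq]
        exact fun h => hs h.symm
      simp only [List.filter_cons, List.filter_nil, hb, if_false, List.append_nil, Bool.false_eq_true]

theorem pv_map_slice {α β : Type} (f : α → β) (xs : List α) (b : Int) :
    (PySem.List.slice xs none (some b)).map f = PySem.List.slice (xs.map f) none (some b) := by
  simp [PySem.List.slice, List.map_take]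

-- ===== VERDICT (by name: the statement is the Claim_ definition above) =====
set_option maxHeartbeats 1000000 in

set_option maxHeartbeats 1000000 in
theorem simple_keyword_match_py_spec : Claim_equal_simple_keyword_match_py := by
  intro query candidate_tools top_k _
  unfold Spec_simple_keyword_match_py simple_keyword_match_py simple_keyword_match_py_alt
  simp only [PySem.List.foldl_append_singleton_eq_map, List.nil_append]
  set W := PySem.Set.ofList (PySem.Str.split₀ (PySem.Str.lower query)) with hW
  set sc : String → Int := fun tool =>
    PySem.Set.len (PySem.Set.inter W (PySem.Set.ofList (PySem.Str.split₀
      (PySem.Str.replace (PySem.Str.lower tool) "_" " ")))) with hsc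
  set ss : List Int := PySem.List.pyRange (PySem.Set.len W) (-1) (-1) with hss
  have hpair : ss.Pairwise (· > ·) := by
    rw [hss, PySem.List.pyRange_neg_one_eq_reverse, List.pairwise_reverse]
    exact PySem.List.pairwise_lt_pyRange_one _ _
  have hscb : ∀ t : String, 0 ≤ sc t ∧ sc t ≤ PySem.Set.len W := by
    intro t
    simp only [hsc, PySem.Set.len, PySem.Set.inter]
    constructor
    · positivity
    · exact_mod_cast List.length_filter_le _ _
  have hmem : ∀ p ∈ candidate_tools.map (fun t => (t, sc t)), p.2 ∈ ss := by
    intro p hp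
    rcases List.mem_map.mp hp with ⟨t, _, rfl⟩
    rw [hss, PySem.List.mem_pyRange_neg_one]
    have := hscb t
    omega
  rw [pv_sorted_eq_pvG ss hpair _ hmem, pv_map_slice]
  refine congrArg (fun l => PySem.List.slice l none (some top_k)) ?_
  rw [PySem.List.foldl_append_eq_flatMap, List.nil_append]
  unfold pvG
  rw [List.map_flatMap]
  refine List.flatMap_congr (fun s _ => ?_)
  rw [pv_buckets_getD, PySem.Dict.getD_empty, List.nil_append,
    List.filter_map, List.map_map]
  have hid : ((fun x : String × Int => x.1) ∘ fun t => (t, sc t)) = id := rfl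
  rw [hid, List.map_id]
  exact List.filter_congr (fun x _ => rfl)
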